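/-
  SEGMENT C3 OF `start_decoder` (the ORDERED codeword lengths, stb_vorbis_fixed.c:3774–3784, 0x1144ee … 0x114594), SPLIT IN THREE at the head
  of loop 3776 (`Vorbis.L.start_decoder.loop8`, 0x114536) and at the loop's exit (`Vorbis.L.start_decoder.at_114590`, 0x114590).

      StartDecoder.C3.Inv          the invariant of every cut point of the segment: the clauses of `InC3` at a program counter `pc` + the
                                   filled prefix `lengths[0 .. ce)` ∈ [1, 31]
      StartDecoder.C3.Inv.carry    THE FRAME LEMMA OF PART C: `Inv` over a callee's footprint (stack below `R`, the reader's fields of `*f`,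
                                   a sub-range of `lengths`), with `C3.step_of_call`, `C3.stepWins`, `C3.sdw_carry`, `C3.f_where`, `C3.Where`
      StartDecoder.AtC3L           the assertion at the loop head 0x114536: `Inv` with `ce = ebp`, `1 ≤ r12 ≤ 32`, `ebp ≤ entries`
      StartDecoder.AtC3X           the assertion at the exit 0x114590: `Inv` with `ce = entries`
      StartDecoder.SegC3a          0x1144ee → 0x114536   `current_length = get_bits(f,5) + 1`, `current_entry = 0`
      StartDecoder.SegC3b          0x114536 → 0x114536 (the measure `33 − r12` decreases) ∨ 0x114590 ∨ ERR: ONE round of loop 3776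
      StartDecoder.SegC3c          0x114590 → 0x114594   `mov ebp, [rsp+24H]` (total = 0), `InC5` from `Inv`
      StartDecoder.SegC3.of_parts  SegC3a → SegC3b → SegC3c → SegC3   (the claim `SegC3` of Vorbis/Spec/StartDecoderA.lean is unchanged)

  Registers at the loop head (callee-saved only): `r14 = c` (`Cur.r14`), `rbx = lengths = c->codeword_lengths` (`Inv.rbx`), `ebp = current_entry`,
  `r12d = current_length`; `r13`, `r15` are dead there (written at 0x11455c, 0x114565). Stack slots: `q[R+18H] = f` (`Cur.slot_f`), `d[R+24H] = 0`
  (Z24, `SDw.frame.z24`), `d[R+30H] = i` (`Cur.slot_i`).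

  Everything but the claims and the two cut assertions is in the sub-namespace `Vorbis.Spec.StartDecoder.C3`.
-/
import Vorbis.LabelsAt
import Vorbis.Spec.StartDecoderA
import Vorbis.Spec.StartDecoderATest
namespace Vorbis.Spec.StartDecoder
open X86 X86.User Asan

set_option maxRecDepth 4000

namespace C3

/-- The windows of `*f` that `SDw 3` (and the record `BookTrans`) read: everything but the reader's fields, `error`, `eof`
and the statistics `setup_memory_required` … -/
def sdWins : Wins := [(0, 8), (24, 48), (112, 136), (152, 1480), (1749, 1750), (1784, 1788)]

/-- **FRAME of `SDw 3`** over a change of memory that leaves the windows `sdWins` of `*f`, the frame constants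
`[R + 8, R + 28H)` and the shadow alone; `Bits` is given for the new memory (the reader's post).
WHEN: a part-C segment needs `SDw 3` (the field `Cur.sd`) at the state a callee returned to, and `Inv.carry` does not fit (another
invariant than `C3.Inv`). HOW: `he` from `ObjEq.of_sameExcept` with the callee's footprint (allowed inside `*f`: `[48,56)`, `[84,96)`,
`[136,144)`, `[1484,1749)`, `[1752,1784)`, i.e. everything outside `sdWins`), `hst` / `hsh` from `Mem.SameExcept.eqOn`, `hbits` = the
field `bits` of the reader's post (`GetBitsSpecPost.bits.bits`), or the old `Bits` carried by `Bits.frame_fields`. -/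
theorem sdw_carry {len : Nat} {A : Arena × List Obj} {Blk : Block → Prop} {Live : Nat → Prop} {mem mem' : Mem} {f R : Nat}
    (h : SDw len 3 A Blk Live mem f R) (he : ObjEq sdWins mem f mem' f)
    (hst : Mem.EqOn (R + 8) (R + 0x28) mem mem') (hR : R + 0x28 ≤ 2 ^ 64)
    (hsh : Mem.EqOn 0xC00000 0xE00000 mem mem') (hbits : Bits Blk len mem' f) : SDw len 3 A Blk Live mem' f R := by
  have m3 : ((152, 1480) : Nat × Nat) ∈ sdWins := by decide
  refine
    { env := h.env.eqOn hsh
      frame := h.frame.frame hst hR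
      arena := h.arena.transfer (he.sub (by decide))
      setups := h.setups
      bits := hbits
      first := ?_
      discard0 := ?_
      header := fun _ => (h.header (by omega)).transfer (he.sub (by decide))
      cb0 := fun _ => ⟨(h.cb0 (by omega)).1.transfer (he.sub (by decide)) (fun _ _ hb => hb), ?_⟩
      rest := ?_ }
  · have e : stb_vorbis.first_decode mem' f = stb_vorbis.first_decode mem f := by
      simp only [vacc, voff]
      exact he.u8 1749 (by decide)
    rw [e]
    exact h.first
  · have e : stb_vorbis.discard_samples_deferred mem' f = stb_vorbis.discard_samples_deferred mem f := by
      simp only [vacc, voff]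
      exact he.i32 1784 (by decide)
    rw [e]
    exact h.discard0
  · have e : stb_vorbis.codebooks mem' f = stb_vorbis.codebooks mem f := by
      simp only [vacc, voff]
      exact he.u64 168 (by decide)
    rw [e]
    exact (h.cb0 (by omega)).2
  · intro o ho1 ho2
    have hz := h.rest o ho1 ho2
    have hlo : restFrom 3 = 176 := by
      simp only [restFrom, voff]
      decide
    rw [hlo] at ho1
    simp only [voff] at ho2
    rw [he (152, 1480) m3 o (by simp only []; omega) (by simp only []; omega)]
    exact hz

/-- Two different members of a list that is pairwise related by a symmetric relation are related.
WHEN: a fact about two objects of `stackObjs … ++ others` is wanted from `ShadowOK.disjoint` (a `List.Pairwise GranDisj`).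
HOW: `pairwise_ne (fun _ _ h => GranDisj.symm h) hsh.shadow.disjoint a b ha hb hne`. -/
theorem pairwise_ne {α : Type} {R : α → α → Prop} (hs : ∀ a b, R a b → R b a) :
    ∀ {l : List α}, l.Pairwise R → ∀ a b, a ∈ l → b ∈ l → a ≠ b → R a b
  | [], _, a, _, ha, _, _ => absurd ha List.not_mem_nil
  | x :: l, h, a, b, ha, hb, hne => by
    obtain ⟨h1, h2⟩ := List.pairwise_cons.mp h
    rcases List.mem_cons.mp ha with rfl | ha'
    · rcases List.mem_cons.mp hb with rfl | hb'
      · exact absurd rfl hne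
      · exact h1 b hb'
    · rcases List.mem_cons.mp hb with rfl | hb'
      · exact hs _ _ (h1 a ha')
      · exact pairwise_ne hs h2 a b ha' hb' hne

/-- **Where `*f` is**: above the function's own stack (`RA + 8 ≤ f`: a stack object of a caller's protected frame) or off the
stack region (an object of `others`); never in the image's text; and apart from the global `log2_4` (two different live
objects share no granule). From the shadow layer inside the function, `Hand.obj` and `Frame.callers`.
WHEN: a window of `*f` must be shown apart from the function's own frame `[R, RA + 8)`, the text, the shadow or `log2_4` (every
frame argument over a callee that writes into `*f`); `Inv.where_` calls it, use that if you have a `C3.Inv`.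
HOW: `f_where h.frame.shadow h.cur.hand.obj h.frame.callers h.frame.ra.1 h.frame.offText h.cur.hand.g_log2`. -/
theorem f_where {others : List Obj} {frames : List (Nat × FrameLayout)} {bF0 : Nat × FrameLayout} {top RA f : Nat}
    {mem : Mem} (hsh : ShadowInv others (bF0 :: frames) top mem) (hobj : LiveIn others frames f 1808)
    (hcallers : ∀ bF, bF ∈ frames → RA + 8 ≤ bF.1) (hRA : RA % 8 = 0)
    (hoff : ∀ o, o ∈ others → L.textHi ≤ o.base) (hlog : Vorbis.Globals.log2_4.obj ∈ others) :
    (RA + 8 ≤ f ∨ f + 1808 ≤ 0x700000 ∨ 0x800000 ≤ f) ∧ 0x119d40 ≤ f ∧ f + 1808 ≤ 0xC00000 ∧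
      (f + 1808 ≤ 0x120640 ∨ 0x120650 ≤ f) := by
  obtain ⟨o, ho, k1, k2⟩ := hobj
  have hall : o ∈ stackObjs (bF0 :: frames) ++ others := by
    rw [stackObjs_cons]
    rcases List.mem_append.mp ho with hs | hoth
    · exact List.mem_append_left _ (List.mem_append_right _ hs)
    · exact List.mem_append_right _ hoth
  have hin := hsh.shadow.inside hall (by omega)
  have hlogall : Vorbis.Globals.log2_4.obj ∈ stackObjs (bF0 :: frames) ++ others := List.mem_append_right _ hlog
  have hne : o ≠ Vorbis.Globals.log2_4.obj := by
    intro e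
    rw [e] at k1 k2
    simp only [GlobalDesc.obj, Vorbis.Globals.log2_4] at k1 k2
    omega
  have hd : GranDisj o Vorbis.Globals.log2_4.obj :=
    pairwise_ne (fun _ _ hab => GranDisj.symm hab) hsh.shadow.disjoint _ _ hall hlogall hne
  have hlg : (f + 1808 ≤ 0x120640 ∨ 0x120650 ≤ f) := by
    unfold GranDisj Obj.gLo Obj.gHi at hd
    simp only [GlobalDesc.obj, Vorbis.Globals.log2_4] at hd
    omega
  have e : L.textHi = 0x119d40 := rfl
  rcases List.mem_append.mp ho with hs | hoth
  · unfold stackObjs at hs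
    obtain ⟨bF, hbF, hmem⟩ := List.mem_flatMap.mp hs
    obtain ⟨hok, a8, _, _, _⟩ := hsh.stack.active bF (List.mem_cons_of_mem _ hbF)
    obtain ⟨g1, g2⟩ := FrameLayout.objsAt_gran hok a8 hmem
    have hc := hcallers bF hbF
    have hlo := hsh.stack.lo
    unfold Obj.gLo at g1
    refine ⟨Or.inl (by omega), by omega, by omega, hlg⟩
  · have h1 := hsh.off o hoth
    have h2 := hoff o hoth
    unfold OffStack at h1
    refine ⟨by omega, by omega, by omega, hlg⟩

/-- **The windows a step of the segment may write**: the stack below the steady stack pointer `R` (the callees' frames and the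
return addresses), the bit reader's fields of `*f` (get_bits' footprint; `error` writes `[f + 140, f + 144)`), and the bytes
`[cl + lo, cl + hi)` of the `lengths` array (memset).
WHEN: the middle term of every frame argument of a part-C segment: `step_of_call` produces `Mem.SameExcept (stepWins …) m mr`,
`Inv.carry` consumes it. HOW: `R = g.R`, `f = g.f`, `cl = Codebook.codeword_lengths s.mem (g.cb s.mem i)`; `lo = hi` (e.g. `0 0`, or
`ce ce`) when the callee does not write `lengths`. -/
def stepWins (R f cl lo hi : Nat) : List Span :=
  [⟨R - 408, R⟩, ⟨f + 48, f + 56⟩, ⟨f + 84, f + 96⟩, ⟨f + 136, f + 144⟩, ⟨f + 1484, f + 1749⟩, ⟨f + 1752, f + 1784⟩,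
    ⟨cl + lo, cl + hi⟩]

/-- The seven windows, as a disjunction for `omega`.
WHEN: a goal `∀ w ∈ stepWins …, <w apart from some range>` (the side condition of `Mem.SameExcept.eqOn`, `.readLE`, `.step_same`).
HOW: `intro w hw; have := stepWins_cases hw; omega` with the facts of `Where` in the context. -/
theorem stepWins_cases {R f cl lo hi : Nat} {w : Span} (hw : w ∈ stepWins R f cl lo hi) :
    (w.lo = R - 408 ∧ w.hi = R) ∨ (w.lo = f + 48 ∧ w.hi = f + 56) ∨ (w.lo = f + 84 ∧ w.hi = f + 96) ∨
      (w.lo = f + 136 ∧ w.hi = f + 144) ∨ (w.lo = f + 1484 ∧ w.hi = f + 1749) ∨ (w.lo = f + 1752 ∧ w.hi = f + 1784) ∨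
      (w.lo = cl + lo ∧ w.hi = cl + hi) := by
  simp only [stepWins, List.mem_cons, List.mem_nil_iff, or_false] at hw
  rcases hw with rfl | rfl | rfl | rfl | rfl | rfl | rfl <;> simp only [and_self, true_or, or_true]

/-- **A call from a state whose stack pointer is the steady `R`**: the push of the return address at `[R − 8]` and the callee's
footprint `ws` (each window inside one of the seven of `stepWins`) are a step of the segment. `m` = the memory before the
`call`, `mc` = at the callee's entry, `mr` = at its return.
WHEN: right after `u_walk` has stepped over a `call` (get_bits, ilog, memset, error, …) from a state with `rsp = g.R`.
HOW: first bring the callee's footprint fact into arithmetic form: `simp only [X86.User.Spec.footprint, vspec, w_rsp_<addr>, w_rdi_<addr>] at w_same`,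
rewrite `(v.reg .rsp - 8).toNat = g.R - 8` and `(UInt64.ofNat g.f).toNat = g.f` in it; then
`step_of_call (f := g.f) (cl := …) (lo := …) (hi := …) hsp (by omega) (by omega) w_mem_<addr> w_same (by intro w hw; simp only [List.mem_cons, …] at hw; rcases hw with rfl | … <;> simp only [] <;> omega)`:
`hmem` = the walker's fact about the push (`w_mem_<addr>`), `hsame` = THE CALLEE'S FOOTPRINT FACT (`w_same`), `hws` = each window of
the callee's footprint lies inside one of the seven windows (callee frames: at most 408 bytes below `R`; get_bits writes `f + 48 …`,
`f + 84 …`, `f + 136 …`, `f + 1484 …`, `f + 1752 …`; error writes `[f + 140, f + 144)`; memset `[cl + lo, cl + hi)`).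
GIVE `f` EXPLICITLY: it occurs only under the disjunction and stays a metavariable otherwise. -/
theorem step_of_call {R f cl lo hi : Nat} {m mc mr : Mem} {sp : Word} {ra : Nat} {ws : List Span}
    (hsp : sp.toNat = R) (hR : 408 ≤ R) (hR64 : R < 2 ^ 64)
    (hmem : mc = m.writeLE (sp - 8) 8 ra) (hsame : Mem.SameExcept ws mc mr)
    (hws : ∀ w, w ∈ ws → (R - 408 ≤ w.lo ∧ w.hi ≤ R) ∨ (f + 48 ≤ w.lo ∧ w.hi ≤ f + 56) ∨ (f + 84 ≤ w.lo ∧ w.hi ≤ f + 96) ∨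
      (f + 136 ≤ w.lo ∧ w.hi ≤ f + 144) ∨ (f + 1484 ≤ w.lo ∧ w.hi ≤ f + 1749) ∨ (f + 1752 ≤ w.lo ∧ w.hi ≤ f + 1784) ∨
      (cl + lo ≤ w.lo ∧ w.hi ≤ cl + hi)) :
    Mem.SameExcept (stepWins R f cl lo hi) m mr := by
  have e8 : (sp - 8).toNat = R - 8 := by
    have : (8 : Word).toNat = 8 := rfl
    rw [UInt64.toNat_sub_of_le _ _ (by rw [UInt64.le_iff_toNat_le, this]; omega), this, hsp]
  have hpush : Mem.SameExcept (stepWins R f cl lo hi) m mc := by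
    rw [hmem]
    apply Mem.SameExcept.writeLE _ m (sp - 8) 8 ra (by omega)
    refine ⟨⟨R - 408, R⟩, List.mem_cons_self, ?_, ?_⟩
    · simp only []
      omega
    · simp only []
      omega
  apply hpush.step_same hsame
  intro w hw a ha1 ha2
  have hc := hws w hw
  have m0 : (⟨R - 408, R⟩ : Span) ∈ stepWins R f cl lo hi := List.mem_cons_self
  have m1 : (⟨f + 48, f + 56⟩ : Span) ∈ stepWins R f cl lo hi := List.mem_cons_of_mem _ List.mem_cons_self
  have m2 : (⟨f + 84, f + 96⟩ : Span) ∈ stepWins R f cl lo hi :=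
    List.mem_cons_of_mem _ (List.mem_cons_of_mem _ List.mem_cons_self)
  have m3 : (⟨f + 136, f + 144⟩ : Span) ∈ stepWins R f cl lo hi :=
    List.mem_cons_of_mem _ (List.mem_cons_of_mem _ (List.mem_cons_of_mem _ List.mem_cons_self))
  have m4 : (⟨f + 1484, f + 1749⟩ : Span) ∈ stepWins R f cl lo hi :=
    List.mem_cons_of_mem _ (List.mem_cons_of_mem _ (List.mem_cons_of_mem _ (List.mem_cons_of_mem _ List.mem_cons_self)))
  have m5 : (⟨f + 1752, f + 1784⟩ : Span) ∈ stepWins R f cl lo hi :=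
    List.mem_cons_of_mem _ (List.mem_cons_of_mem _ (List.mem_cons_of_mem _ (List.mem_cons_of_mem _
      (List.mem_cons_of_mem _ List.mem_cons_self))))
  have m6 : (⟨cl + lo, cl + hi⟩ : Span) ∈ stepWins R f cl lo hi :=
    List.mem_cons_of_mem _ (List.mem_cons_of_mem _ (List.mem_cons_of_mem _ (List.mem_cons_of_mem _
      (List.mem_cons_of_mem _ (List.mem_cons_of_mem _ List.mem_cons_self)))))
  rcases hc with c | c | c | c | c | c | c
  · exact ⟨_, m0, by simp only []; omega, by simp only []; omega⟩
  · exact ⟨_, m1, by simp only []; omega, by simp only []; omega⟩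
  · exact ⟨_, m2, by simp only []; omega, by simp only []; omega⟩
  · exact ⟨_, m3, by simp only []; omega, by simp only []; omega⟩
  · exact ⟨_, m4, by simp only []; omega, by simp only []; omega⟩
  · exact ⟨_, m5, by simp only []; omega, by simp only []; omega⟩
  · exact ⟨_, m6, by simp only []; omega, by simp only []; omega⟩

/-- **THE INVARIANT OF LOOP 3776** (and of every state of the segment between two calls), but for the registers r12 = current_length
and ebp = current_entry, which the walk tracks: the common part `Frame` at the program counter `pc`, CUR(i), K1, SP = 0,
rbx = lengths = CL, the block of `lengths` (allocated since the head of the iteration), no temp block, the fresh fields — the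
clauses of `InC3` — and `filled`: the bytes `lengths[0 .. ce)` are lengths in `[1, 31]`.
WHEN: the assertion at every cut point of `C3` (`AtC3L`, `AtC3X` are `Inv` + register facts); a DENSE-book segment of part C whose
state is `Frame + Cur + K1 + SP = 0 + rbx = CL + Block(CL, E) + temps = [] + Fresh7` can use it as is (`ce = 0` if no prefix is known). -/
structure Inv (u₀ : State) (g : Ghost) (i : Nat) (A2 A3 Ai : Arena) (A : Arena × List Obj) (pc : Word) (ce : Nat)
    (s : State) : Prop where
  frame : Frame u₀ g pc A s
  cur : Cur g i A2 A3 Ai A s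
  k1 : Codebook.K1 s.mem (g.cb s.mem i)
  sparse0 : Codebook.sparse s.mem (g.cb s.mem i) = 0
  rbx : s.reg .rbx = addr (Codebook.codeword_lengths s.mem (g.cb s.mem i))
  lengths : Since Ai A.1 ⟨Codebook.codeword_lengths s.mem (g.cb s.mem i), (Codebook.entries s.mem (g.cb s.mem i)).toNat⟩
  noTemps : A.1.temps = []
  fresh : Fresh7 s.mem (g.cb s.mem i)
  filled : ∀ j, j < ce → 1 ≤ s.mem.u8 (Codebook.codeword_lengths s.mem (g.cb s.mem i) + j) ∧
    s.mem.u8 (Codebook.codeword_lengths s.mem (g.cb s.mem i) + j) ≤ 31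

/-- The entry assertion of the segment is the invariant with nothing filled yet.
WHEN: first line of a walk from `AtC3`. HOW: `obtain ⟨A, A2, A3, Ai, h⟩ := hat; have hI := C3.Inv.of_inC3 h`. -/
theorem Inv.of_inC3 {u₀ : State} {g : Ghost} {i : Nat} {A2 A3 Ai : Arena} {A : Arena × List Obj} {v : State}
    (h : InC3 u₀ g i A2 A3 Ai A v) : Inv u₀ g i A2 A3 Ai A pc_C3 0 v :=
  ⟨h.frame, h.cur, h.k1, h.sparse0, h.rbx, h.lengths, h.noTemps, h.fresh, fun j hj => absurd hj (Nat.not_lt_zero j)⟩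

/-- **Where everything is**, as arithmetic for `omega` (`R` the steady stack pointer, `RA = R + 1480`, `f`, the arena `[B, B + L)`,
the block `[cl, cl + E)` of `lengths`).
WHEN / HOW: `obtain ⟨q1, …, q16⟩ := hI.where_` once at the top of a walk; afterwards every `omega` / `u_omega` side condition about
"this window is not that one" closes from these sixteen facts. -/
structure Where (R RA f B Ln cl E : Nat) : Prop where
  ra8 : RA % 8 = 0
  r8 : R % 8 = 0
  r_eq : R + 1480 = RA
  ra_lo : 0x700000 + 1888 ≤ RA
  ra_hi : RA + 8 ≤ 0x800000
  f_stack : RA + 8 ≤ f ∨ f + 1808 ≤ 0x700000 ∨ 0x800000 ≤ f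
  f_lo : 0x119d40 ≤ f
  f_hi : f + 1808 ≤ 0xC00000
  f_log : f + 1808 ≤ 0x120640 ∨ 0x120650 ≤ f
  f_out : f + 1808 ≤ B ∨ B + Ln ≤ f
  b_lo : 0x119d40 ≤ B
  b_log : 0x120650 ≤ B ∨ B + Ln ≤ 0x120640
  cl_lo : B ≤ cl
  cl_hi : cl + E ≤ B + Ln
  cl_stack : cl + E ≤ 0x700000 ∨ 0x800000 ≤ cl
  cl_in : cl + E ≤ 0xC00000

/-- The arithmetic of the invariant: `Where` from `Inv` (uses `f_where`, `Hand.objOut`, `Hand.outside`, `arena_inside`,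
`ArenaOK.blk_off_stack`, `DataEnv.ok.inside`). WHEN: at the top of every walk from an `Inv`. HOW: `have hW := hI.where_`. -/
theorem Inv.where_ {u₀ : State} {g : Ghost} {i : Nat} {A2 A3 Ai : Arena} {A : Arena × List Obj} {pc : Word} {ce : Nat}
    {s : State} (h : Inv u₀ g i A2 A3 Ai A pc ce s) :
    Where g.R g.RA g.f A.1.B A.1.L (Codebook.codeword_lengths s.mem (g.cb s.mem i))
      (Codebook.entries s.mem (g.cb s.mem i)).toNat := by
  obtain ⟨h1, h2, h3⟩ := h.frame.ra
  obtain ⟨h4, h5⟩ := h.frame.r_eq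
  have ha := h.cur.sd.arena
  have hfw := f_where h.frame.shadow h.cur.hand.obj h.frame.callers h1 h.frame.offText h.cur.hand.g_log2
  obtain ⟨w1, w2, w3, w4⟩ := hfw
  have hout := h.cur.hand.objOut
  simp only [Off.sizeof.stb_vorbis] at hout
  have htext := h.cur.hand.arenaText
  have e : L.textHi = 0x119d40 := rfl
  have hlogm : (Block.mk 0x120640 16) ∈ fixedBlocks g.len :=
    List.mem_cons_of_mem _ (List.mem_cons_of_mem _ (by simp only [globalBlocks, List.mem_cons, true_or, or_true]))
  have hlog := h.cur.hand.outside _ hlogm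
  try dsimp only at hlog
  have hin := arena_inside ha h.lengths.1
  have hoff := ha.blk_off_stack h.lengths.1
  have hdat := h.cur.sd.env.ok.inside _ (up g A _ h.lengths.1)
  try dsimp only at hin hoff hdat
  simp only [depth, steady] at h2 h4
  exact ⟨h1, h5, h4, h2, h3, w1, w2, w3, w4, hout, by omega, by omega, hin.1, hin.2, hoff, hdat.2⟩

set_option maxHeartbeats 2000000 in
/-- **FRAME OF THE INVARIANT** over a step of the segment: a callee's footprint and the own pushes inside `stepWins` — the stack
below `R`, the bit reader's fields of `*f`, the bytes `[lo, hi)` of `lengths` with `ce ≤ lo` (the filled prefix is not touched)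
and `hi ≤ entries`. The registers the invariant names are unchanged, DF / MXCSR as the ABI wants; `Bits` is given for the new
memory (the reader's post, or its frame lemma).
WHEN: at the state a callee returned to (`s' = s_<addr>r`), or after a stretch of own instructions that write nothing (`hs` by
`rw [w_mem]; exact Mem.SameExcept.refl _ _`), to get the invariant back at the new program counter `pc'`.
HOW: `hI.carry (pc' := L.start_decoder.<label>) w_rip w_rsp (w_kept.get .r14 rfl) (w_kept.get .rbx rfl) w_inv hstep hlo hlh hhi hbits`:
`hs` = `hstep` FROM `step_of_call` (the callee's footprint fact goes in THERE); `lo hi` = the bytes of `lengths` the callee may write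
(`ce ≤ lo ≤ hi ≤ entries`; take `lo = hi` for a callee that does not write them); `hbits` = `hpost.bits.bits` after get_bits, the old
`Bits` through `Bits.frame_fields` after `error`, the old `Bits` rewritten along `ObjEq` after ilog / memset. THE FILLED PREFIX `ce`
IS KEPT, NOT EXTENDED: after memset get `filled` for `ce + n` from memset's post and rebuild the structure with `{ hIr with filled := … }`. -/
theorem Inv.carry {u₀ : State} {g : Ghost} {i : Nat} {A2 A3 Ai : Arena} {A : Arena × List Obj} {pc pc' : Word} {ce lo hi : Nat}
    {s s' : State} (h : Inv u₀ g i A2 A3 Ai A pc ce s)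
    (hrip : s'.rip = pc') (hrsp : s'.reg .rsp = s.reg .rsp) (hr14 : s'.reg .r14 = s.reg .r14)
    (hrbx : s'.reg .rbx = s.reg .rbx) (hinv : abiInv s')
    (hs : Mem.SameExcept (stepWins g.R g.f (Codebook.codeword_lengths s.mem (g.cb s.mem i)) lo hi) s.mem s'.mem)
    (hlo : ce ≤ lo) (hlh : lo ≤ hi) (hhi : hi ≤ (Codebook.entries s.mem (g.cb s.mem i)).toNat)
    (hbits : Bits (g.Blk A) g.len s'.mem g.f) : Inv u₀ g i A2 A3 Ai A pc' ce s' := by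
  have hw := h.where_
  have ha := h.cur.sd.arena
  have hcb := h.cur.ages.cbOK
  have hrbx0 := h.rbx
  have hlen0 := h.lengths
  have hfil0 := h.filled
  generalize hcl : Codebook.codeword_lengths s.mem (g.cb s.mem i) = cl at *
  generalize hE : (Codebook.entries s.mem (g.cb s.mem i)).toNat = E at *
  obtain ⟨q1, q2, q3, q4, q5, q6, q7, q8, q9, q10, q11, q12, q13, q14, q15, q16⟩ := hw
  -- the shadow, the text, the function's own frame, the prefix of `lengths`
  have hsh : Mem.EqOn 0xC00000 0xE00000 s.mem s'.mem := by
    apply hs.eqOn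
    intro w hw
    have := stepWins_cases hw
    omega
  have htext : Mem.EqOn L.textLo L.textHi s.mem s'.mem := by
    apply hs.eqOn
    intro w hw
    have := stepWins_cases hw
    have e : L.textHi = 0x119d40 := rfl
    omega
  have hfr : Mem.EqOn g.R (g.RA + 8) s.mem s'.mem := by
    apply hs.eqOn
    intro w hw
    have := stepWins_cases hw
    omega
  have hpre : Mem.EqOn cl (cl + ce) s.mem s'.mem := by
    apply hs.eqOn
    intro w hw
    have := stepWins_cases hw
    omega
  have hRA : g.RA + 8 ≤ 2 ^ 64 := by omega
  -- the windows of `*f`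
  have he : ObjEq sdWins s.mem g.f s'.mem g.f := by
    apply ObjEq.of_sameExcept hs
    · intro w hw
      simp only [sdWins, List.mem_cons, List.mem_nil_iff, or_false] at hw
      rcases hw with rfl | rfl | rfl | rfl | rfl | rfl <;> simp only [] <;> omega
    · intro w hw sp hsp
      have := stepWins_cases hsp
      simp only [sdWins, List.mem_cons, List.mem_nil_iff, or_false] at hw
      rcases hw with rfl | rfl | rfl | rfl | rfl | rfl <;> simp only [] <;> omega
  -- every block of the head-of-iteration snapshot
  have hk : AllKept Ai.Blk s.mem s'.mem := by
    intro B hB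
    have hBA : A.1.Blk B := hB.mono h.cur.ages.exti
    have hin := arena_inside ha hBA
    have hoff := ha.blk_off_stack hBA
    have hd := ha.old_disjoint_since h.cur.ages.exti hB hlen0
    simp only [vblock] at hd
    apply Block.Kept.of_sameExcept hs
    · intro w hw
      have := stepWins_cases hw
      omega
    · exact ha.blkOK.no_wrap hBA
  have hages := h.cur.ages.frame_old (he.sub (by decide)) hk
  have hsd := sdw_carry h.cur.sd he (hfr.mono (by omega) (by omega)) (by omega) hsh hbits
  -- the fields of `*f` the invariant names
  have ecnt : stb_vorbis.codebook_count s'.mem g.f = stb_vorbis.codebook_count s.mem g.f := by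
    simp only [vacc, voff]
    exact he.i32 160 (by decide)
  have ecbs : stb_vorbis.codebooks s'.mem g.f = stb_vorbis.codebooks s.mem g.f := by
    simp only [vacc, voff]
    exact he.u64 168 (by decide)
  have ecb : g.cb s'.mem i = g.cb s.mem i := by
    unfold Ghost.cb
    simp only [stb_vorbis.codebooks_at]
    rw [ecbs]
  -- the struct `cb(i)` and the codebooks block
  have hkcbs := hk _ hcb.F2
  have hkc : (Codebook.block (g.cb s.mem i)).Kept s.mem s'.mem := hcb.cb_kept hkcbs i h.cur.lt
  have hsf := Codebook.SameFields.of_kept hkc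
  have hwrap := ha.blkOK.no_wrap ((hcb.F2.mono h.cur.ages.exti))
  have hF1 := hcb.F1
  refine
    { frame :=
        { entry := h.frame.entry
          rip := hrip
          rsp := by rw [hrsp]; exact h.frame.rsp
          shadowIdx := by rw [hfr.u64 (g.R + 8) (by omega) (by omega) hRA]; exact h.frame.shadowIdx
          saved_rbx := by rw [hfr.u64 (g.R + 0x598) (by omega) (by omega) hRA]; exact h.frame.saved_rbx
          saved_rbp := by rw [hfr.u64 (g.R + 0x5a0) (by omega) (by omega) hRA]; exact h.frame.saved_rbp
          saved_r12 := by rw [hfr.u64 (g.R + 0x5a8) (by omega) (by omega) hRA]; exact h.frame.saved_r12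
          saved_r13 := by rw [hfr.u64 (g.R + 0x5b0) (by omega) (by omega) hRA]; exact h.frame.saved_r13
          saved_r14 := by rw [hfr.u64 (g.R + 0x5b8) (by omega) (by omega) hRA]; exact h.frame.saved_r14
          saved_r15 := by rw [hfr.u64 (g.R + 0x5c0) (by omega) (by omega) hRA]; exact h.frame.saved_r15
          saved_ra := by rw [hfr.u64 (g.R + 0x5c8) (by omega) (by omega) hRA]; exact h.frame.saved_ra
          code := Mem.EqOn.trans h.frame.code htext
          inv := hinv
          shadow := h.frame.shadow.untouched hsh
          offText := h.frame.offText
          ext := h.frame.ext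
          callers := h.frame.callers
          sh7 := ?sh7
          same := ?same }
      cur :=
        { sd := hsd
          hand := h.cur.hand
          ages := hages
          zf := ?zf
          lt := by rw [ecnt]; exact h.cur.lt
          slot_f := by rw [hfr.u64 (g.R + 0x18) (by omega) (by omega) hRA]; exact h.cur.slot_f
          slot_i := by rw [hfr.u32 (g.R + 0x30) (by omega) (by omega) hRA]; exact h.cur.slot_i
          r14 := by rw [hr14, ecb]; exact h.cur.r14 }
      k1 := by rw [ecb]; exact h.k1.frame hsf
      sparse0 := by rw [ecb, hsf.sparse]; exact h.sparse0
      rbx := by rw [hrbx, ecb, hsf.codeword_lengths, hcl]; exact hrbx0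
      lengths := by rw [ecb, hsf.codeword_lengths, hsf.entries, hcl, hE]; exact hlen0
      noTemps := h.noTemps
      fresh := ?fresh
      filled := ?filled }
  case sh7 =>
    intro k hk16
    have e1 : (UInt64.ofNat (Vorbis.Globals.log2_4.beg + k)).toNat = 0x120640 + k := by
      have := toNat_addr (Vorbis.Globals.log2_4.beg + k) (by simp only [Vorbis.Globals.log2_4]; omega)
      unfold addr at this
      rw [this]
      rfl
    rw [hs.readLE _ 1 (by rw [e1]; omega) ?_]
    · exact h.frame.sh7 k hk16
    · intro w hw
      have := stepWins_cases hw
      rw [e1]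
      omega
  case same =>
    apply h.frame.same.step_same hs
    intro w hw a ha1 ha2
    have hc := stepWins_cases hw
    have hB := h.frame.ext.B
    have hL := h.frame.ext.L
    have m0 : (⟨g.RA - depth, g.RA⟩ : Span) ∈ footprint g := List.mem_cons_self
    have m1 : (⟨g.f, g.f + 1808⟩ : Span) ∈ footprint g := List.mem_cons_of_mem _ List.mem_cons_self
    have m2 : (⟨g.A0.1.B, g.A0.1.B + g.A0.1.L⟩ : Span) ∈ footprint g :=
      List.mem_cons_of_mem _ (List.mem_cons_of_mem _ (List.mem_cons_of_mem _ List.mem_cons_self))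
    by_cases c0 : w.lo = g.R - 408
    · refine ⟨_, m0, ?_, ?_⟩
      · simp only [depth]
        omega
      · simp only []
        omega
    · by_cases c1 : w.lo = cl + lo
      · refine ⟨_, m2, ?_, ?_⟩
        · simp only []
          omega
        · simp only []
          omega
      · refine ⟨_, m1, ?_, ?_⟩
        · simp only []
          omega
        · simp only []
          omega
  case zf =>
    rw [ecbs, ecnt]
    have hlt := h.cur.lt
    apply ZF.same h.cur.zf
    · apply Mem.EqOn.mono hkcbs.same
      · simp only [vblock, voff]
        omega
      · simp only [vblock]
        exact Nat.le_refl _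
    · omega
    · simp only [vblock] at hwrap
      exact hwrap
  case fresh =>
    rw [ecb]
    have hf := h.fresh
    exact
      { lookup_type := by rw [hsf.lookup_type]; exact hf.lookup_type
        lookup_values := by rw [hsf.lookup_values]; exact hf.lookup_values
        multiplicands := by rw [hsf.multiplicands]; exact hf.multiplicands
        sorted_codewords := by rw [hsf.sorted_codewords]; exact hf.sorted_codewords
        sorted_values := by rw [hsf.sorted_values]; exact hf.sorted_values
        codewords := by rw [hsf.codewords]; exact hf.codewords
        sorted_entries := by rw [hsf.sorted_entries]; exact hf.sorted_entries }
  case filled =>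
    intro j hj
    rw [ecb, hsf.codeword_lengths, hcl, hpre.u8 (cl + j) (by omega) (by omega) (by omega)]
    exact hfil0 j hj
end C3

/-- **`AtC3L i`, 0x114536** (`loop8`, the head of loop 3776 `while (current_entry < c->entries)`; exit of `C3a`, entry and back-edge exit of
`C3b`): the invariant `C3.Inv` with the filled prefix `ce = ebp = current_entry` (the whole register `rbp`: `mov ebp, …` zero-extends),
`1 ≤ r12 = current_length ≤ 32` (the whole register: `lea r12d, [rax+1]`, `add r12d, 1` zero-extend; the bound makes the measure
`33 − r12` of the loop well-founded: the body tests `current_length ≤ 31` at 0x11455f before it adds 1), and `current_entry ≤ entries`.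
`r13`, `r15` are not live here. -/
def AtC3L (u₀ : State) (g : Ghost) (i : Nat) (w : State) : Prop :=
  ∃ (A : Arena × List Obj) (A2 A3 Ai : Arena),
    C3.Inv u₀ g i A2 A3 Ai A L.start_decoder.loop8 (w.reg .rbp).toNat w ∧
    1 ≤ (w.reg .r12).toNat ∧ (w.reg .r12).toNat ≤ 32 ∧
    ((w.reg .rbp).toNat : Int) ≤ Codebook.entries w.mem (g.cb w.mem i)

/-- **`AtC3X i`, 0x114590** (`at_114590`, the exit of loop 3776: `jle` of 0x114545 taken, `entries ≤ current_entry`, hence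
`current_entry = entries`; exit of `C3b`, entry of `C3c`): the invariant `C3.Inv` with EVERY byte of `lengths[0 .. entries)` filled.
No register but those of `Inv` is live: `ebp` is re-loaded from `d[R+24H]` (the literal 0: `total` of line 3749) by the instruction at
this address. -/
def AtC3X (u₀ : State) (g : Ghost) (i : Nat) (w : State) : Prop :=
  ∃ (A : Arena × List Obj) (A2 A3 Ai : Arena),
    C3.Inv u₀ g i A2 A3 Ai A L.start_decoder.at_114590 (Codebook.entries w.mem (g.cb w.mem i)).toNat w

/-- **Segment `start_decoder.C3a`** (0x1144ee … 0x114505, 6 instructions: `current_length = get_bits(f, 5) + 1`, `current_entry = 0` from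
the literal 0 of `d[R+24H]`, the jump to the loop head): from `AtC3` to the head of loop 3776. One call (get_bits), no check site. -/
def SegC3a (Lay : Layout) (μ : Microarch) (u₀ : State) : Prop :=
  ∀ (g : Ghost) (i : Nat) (v : State), AtC3 u₀ g i v → ReachVia Lay μ WayInv v (fun w => AtC3L u₀ g i w)

/-- **Segment `start_decoder.C3b`** (ONE ROUND of loop 3776, 0x114536 … 0x114533 with the two error stubs 0x114507, 0x114579: the test
`current_entry < c->entries` (check 0x11453a), `n = get_bits(f, ilog(entries − current_entry))`, `current_length ≥ 32` → error,
`current_entry + n > entries` (check 0x11456e) → error, `memset(lengths + current_entry, current_length, n)`, `++current_length`,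
`current_entry += n`): from the loop head back to the loop head WITH A SMALLER MEASURE `33 − r12` (`current_length` grows by one every
round and is `≤ 32`), or to the loop's exit 0x114590, or to the error exit. The composition does the induction. -/
def SegC3b (Lay : Layout) (μ : Microarch) (u₀ : State) : Prop :=
  ∀ (g : Ghost) (i : Nat) (v : State), AtC3L u₀ g i v →
    ReachVia Lay μ WayInv v (fun w =>
      (AtC3L u₀ g i w ∧ 33 - (w.reg .r12).toNat < 33 - (v.reg .r12).toNat) ∨ AtC3X u₀ g i w ∨ AtERR u₀ g w)

/-- **Segment `start_decoder.C3c`** (0x114590, ONE instruction `mov ebp, DWORD PTR [rsp+24H]`: `total = 0`, then `InC5` from the invariant: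
`lengths = CL` dense, L(E) from the filled prefix, `total = 0 ≤ entries`): from the loop's exit to `AtC5`. No call, no check site. -/
def SegC3c (Lay : Layout) (μ : Microarch) (u₀ : State) : Prop :=
  ∀ (g : Ghost) (i : Nat) (v : State), AtC3X u₀ g i v → ReachVia Lay μ WayInv v (fun w => AtC5 u₀ g i w)

/-- **Segment C3 from its three parts**: C3a reaches the loop head; the loop by `ReachVia.loop` with the measure `33 − r12` (`AtC3L`
bounds `r12 ≤ 32`, C3b states the decrease) reaches the loop's exit or the error exit; C3c goes from the loop's exit to `AtC5`. -/
theorem SegC3.of_parts {Lay : Layout} {μ : Microarch} {u₀ : State} (ha : SegC3a Lay μ u₀) (hb : SegC3b Lay μ u₀)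
    (hc : SegC3c Lay μ u₀) : SegC3 Lay μ u₀ := by
  intro g i v hat
  -- the loop: from any state at its head to the exit 0x114590 or the error exit
  have hloop : ∀ s, AtC3L u₀ g i s → ReachVia Lay μ WayInv s (fun w => AtC3X u₀ g i w ∨ AtERR u₀ g w) := by
    apply ReachVia.loop (fun s => 33 - (s.reg .r12).toNat)
    intro s hs
    refine (hb g i s hs).mono ?_
    intro w hw
    rcases hw with ⟨hl, hlt⟩ | hx | he
    · exact Or.inr ⟨hl, hlt⟩
    · exact Or.inl (Or.inl hx)
    · exact Or.inl (Or.inr he)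
  refine (ha g i v hat).trans ?_
  intro v1 h1
  refine (hloop v1 h1).trans ?_
  intro v2 h2
  rcases h2 with hx | he
  · exact (hc g i v2 hx).mono (fun w hw => Or.inl hw)
  · exact ReachVia.done (Or.inr he)

end Vorbis.Spec.StartDecoder
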